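-- pv_equiv track=rewrite | github.com/lanlab-org/EnglishPal | app/Article.py | get_answer_part
-- ===== SOURCE A (Python) =====
-- def get_answer_part(s):
--     s = s.strip()
--     result = []
--     flag = 0
--     for line in s.split('\n'):
--         line = line.strip()
--         if line == 'ANSWER':
--             flag = 1
--         elif flag == 1:
--             result.append(line)
--     # https://css-tricks.com/snippets/javascript/showhide-element/
--     js = '''
-- <script type="text/javascript">
--
--     function toggle_visibility(id) {
--        var e = document.getElementById(id);
--        if(e.style.display == 'block')
--           e.style.display = 'none';
--        else
--           e.style.display = 'block';
--     }
-- </script>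
--     '''
--     html_code = js
--     html_code += '\n'
--     html_code += '<button onclick="toggle_visibility(\'answer\');">ANSWER</button>\n'
--     html_code += '<div id="answer" style="display:none;">%s</div>\n' % ('\n'.join(result))
--     return html_code
-- ===== SOURCE B (Python) =====
-- def get_answer_part(s):
--     lines = [line.strip() for line in s.strip().split('\n')]
--     try:
--         i = lines.index('ANSWER')
--         result = [line for line in lines[i + 1:] if line != 'ANSWER']
--     except ValueError:
--         result = []
--     js = '''
-- <script type="text/javascript">
--
--     function toggle_visibility(id) {
--        var e = document.getElementById(id);
--        if(e.style.display == 'block')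
--           e.style.display = 'none';
--        else
--           e.style.display = 'block';
--     }
-- </script>
--     '''
--     return (js + '\n'
--             + '<button onclick="toggle_visibility(\'answer\');">ANSWER</button>\n'
--             + '<div id="answer" style="display:none;">%s</div>\n' % ('\n'.join(result)))
-- ===== Notes on version B (the rewrite author's own statement) =====
-- stated objective: simpler
-- what changed: Replaces the stateful flag-driven loop with a direct decomposition: strip the lines once, locate the first marker line with list.index, and filter everything after it in one comprehension.
import Mathlib
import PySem

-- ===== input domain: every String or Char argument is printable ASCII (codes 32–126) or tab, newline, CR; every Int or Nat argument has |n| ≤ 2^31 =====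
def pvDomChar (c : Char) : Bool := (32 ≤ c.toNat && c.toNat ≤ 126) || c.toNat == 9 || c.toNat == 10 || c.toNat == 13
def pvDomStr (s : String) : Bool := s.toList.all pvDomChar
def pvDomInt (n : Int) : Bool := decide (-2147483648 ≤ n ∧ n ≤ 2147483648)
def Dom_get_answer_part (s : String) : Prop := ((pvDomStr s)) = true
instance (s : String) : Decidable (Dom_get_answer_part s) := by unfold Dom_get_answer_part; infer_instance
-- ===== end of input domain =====

-- B replaces A's stateful flag loop by locating the first 'ANSWER' line with index and
-- filtering the lines after it; same return value, simpler decomposition.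

-- the js/button/div boilerplate, identical literals in both Pythons
def pvJS : String := "\n<script type=\"text/javascript\">\n\n    function toggle_visibility(id) {\n       var e = document.getElementById(id);\n       if(e.style.display == 'block')\n          e.style.display = 'none';\n       else\n          e.style.display = 'block';\n    }\n</script>\n    "
def pvButton : String := "<button onclick=\"toggle_visibility('answer');\">ANSWER</button>\n"

-- ===== PORT A =====
-- loop body of A: strip the line, set the flag on 'ANSWER', append when flag is 1
def pvLoopA (st : Int × List String) (line : String) : Int × List String :=
  let line := PySem.Str.strip line
  if line = "ANSWER" then (1, st.2)
  else if st.1 = 1 then (st.1, st.2 ++ [line])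
  else st

def get_answer_part (s : String) : String :=
  let s := PySem.Str.strip s
  let st := ((PySem.Str.split? s "\n").getD []).foldl pvLoopA (0, [])
  pvJS ++ "\n" ++ pvButton
    ++ "<div id=\"answer\" style=\"display:none;\">" ++ PySem.Str.join "\n" st.2 ++ "</div>\n"

-- ===== PORT B =====
def get_answer_part_alt (s : String) : String :=
  let lines := ((PySem.Str.split? (PySem.Str.strip s) "\n").getD []).map PySem.Str.strip
  let result : List String :=
    match PySem.List.index? lines "ANSWER" with
    | some i => (PySem.List.slice lines (some ((i : Int) + 1)) none).filter (fun line => line ≠ "ANSWER")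
    | none => []
  pvJS ++ "\n" ++ pvButton
    ++ "<div id=\"answer\" style=\"display:none;\">" ++ PySem.Str.join "\n" result ++ "</div>\n"

-- ===== PRECONDITION & SPEC =====
def Spec_get_answer_part (s : String) (out : String) : Prop := out = get_answer_part_alt s
instance (s : String) (out : String) : Decidable (Spec_get_answer_part s out) := by unfold Spec_get_answer_part; infer_instance

-- ===== CLAIM (what is proved, stated in full; the proofs are below) =====
def Claim_equal_get_answer_part : Prop := ∀ (s : String), Dom_get_answer_part s → Spec_get_answer_part s (get_answer_part s)

-- ===== LEMMAS AND PROOFS =====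

-- A's loop body on an already-stripped line
def pvCore (st : Int × List String) (line : String) : Int × List String :=
  if line = "ANSWER" then (1, st.2)
  else if st.1 = 1 then (st.1, st.2 ++ [line])
  else st

theorem pvLoopA_eq_core (st : Int × List String) (line : String) :
    pvLoopA st line = pvCore st (PySem.Str.strip line) := rfl

theorem core_flag1 (ls : List String) (acc : List String) :
    ls.foldl pvCore (1, acc) = (1, acc ++ ls.filter (fun line => line ≠ "ANSWER")) := by
  induction ls generalizing acc with
  | nil => simp
  | cons x xs ih =>
    by_cases hx : x = "ANSWER" <;>
      simp [List.foldl_cons, pvCore, hx, ih, List.filter_cons]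

theorem core_flag0 (ls : List String) (acc : List String) :
    ls.foldl pvCore (0, acc) =
      match PySem.List.index? ls "ANSWER" with
      | none => (0, acc)
      | some i => (1, acc ++ (ls.drop (i + 1)).filter (fun line => line ≠ "ANSWER")) := by
  induction ls generalizing acc with
  | nil => simp [PySem.List.index?]
  | cons x xs ih =>
    by_cases hx : x = "ANSWER"
    · subst hx
      rw [List.foldl_cons, show pvCore (0, acc) "ANSWER" = (1, acc) from rfl,
        PySem.List.index?_cons_self, core_flag1]
      simp
    · rw [List.foldl_cons, show pvCore (0, acc) x = (0, acc) by simp [pvCore, hx],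
        ih acc, PySem.List.index?_cons_of_ne _ hx]
      cases PySem.List.index? xs "ANSWER" <;> simp

theorem foldA_eq (ls : List String) (init : Int × List String) :
    ls.foldl pvLoopA init = (ls.map PySem.Str.strip).foldl pvCore init := by
  induction ls generalizing init with
  | nil => rfl
  | cons x xs ih => rw [List.foldl_cons, List.map_cons, List.foldl_cons, pvLoopA_eq_core, ih]

theorem result_eq (ls : List String) :
    (ls.foldl pvLoopA ((0 : Int), ([] : List String))).2 =
      match PySem.List.index? (ls.map PySem.Str.strip) "ANSWER" with
      | some i => (PySem.List.slice (ls.map PySem.Str.strip) (some ((i : Int) + 1)) none).filter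
          (fun line => line ≠ "ANSWER")
      | none => [] := by
  rw [foldA_eq, core_flag0]
  cases h : PySem.List.index? (ls.map PySem.Str.strip) "ANSWER" with
  | none => rfl
  | some i =>
    have hc : ((i : Int) + 1) = ((i + 1 : Nat) : Int) := by push_cast; ring
    simp only [hc, PySem.List.slice_from_natCast, List.nil_append]

-- ===== VERDICT (by name: the statement is the Claim_ definition above) =====
theorem get_answer_part_spec : Claim_equal_get_answer_part := by
  intro s _
  show get_answer_part s = get_answer_part_alt s
  simp only [get_answer_part, get_answer_part_alt, result_eq]
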